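-- pv_equiv track=rewrite | github.com/mikereil80/cs115 | lab6.py | ternaryToNum
-- ===== SOURCE A (Python) =====
-- def ternaryToNum(s):
--     '''Precondition: s is a string of 0s, 1s, and 2s.
--     Returns the integer corresponding to the ternary representation in s.
--     Note: the empty string represents 0.'''
--     if s=="":
--         return 0
--     elif s=="0":
--         return 0
--     elif s=="1":
--         return 1
--     elif s=="2":
--         return 2
--     elif s[0]=="2" and s != "2":
--         return 2*3**(len(s)-1)+ternaryToNum(s[1:])
--     elif s[0]=="1" and s != "1":
--         return 3**(len(s)-1)+ternaryToNum(s[1:])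
--     else:
--         return ternaryToNum(s[1:])
-- ===== SOURCE B (Python) =====
-- def ternaryToNum(s):
--     '''Horner's method: one left-to-right pass, result = result*3 + digit.'''
--     r = 0
--     for c in s:
--         r = r * 3 + (1 if c == '1' else 2 if c == '2' else 0)
--     return r
-- ===== Notes on version B (the rewrite author's own statement) =====
-- stated objective: faster
-- what changed: Replaces A's recursion that recomputes 3**(len(s)-1) at every step (and builds a new slice s[1:] each call) with a single left-to-right Horner pass r = r*3 + digit.
import Mathlib
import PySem

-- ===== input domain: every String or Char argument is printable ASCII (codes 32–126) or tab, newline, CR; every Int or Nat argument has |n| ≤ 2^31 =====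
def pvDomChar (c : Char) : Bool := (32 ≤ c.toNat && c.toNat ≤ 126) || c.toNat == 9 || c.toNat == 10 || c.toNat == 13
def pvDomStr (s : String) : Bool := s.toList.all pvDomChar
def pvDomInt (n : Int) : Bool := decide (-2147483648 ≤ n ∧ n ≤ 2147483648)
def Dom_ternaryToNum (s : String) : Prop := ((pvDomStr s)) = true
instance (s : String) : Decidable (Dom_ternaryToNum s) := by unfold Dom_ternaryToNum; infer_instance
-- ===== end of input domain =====

-- B replaces A's recursion with per-step powers 3**(len(s)-1) by a single Horner pass (timing: asymptotically faster).
-- ===== PORT A =====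
-- Literal port of A's recursion on the character list; s[1:] is cs.tail (= PySem.Chars.slice cs (some 1) none, by PySem.Chars.slice_from_one).
def ternaryToNumA (cs : List Char) : Int :=
  if cs = [] then 0
  else if cs = ['0'] then 0
  else if cs = ['1'] then 1
  else if cs = ['2'] then 2
  else if PySem.Chars.pyGet? cs 0 = some '2' ∧ cs ≠ ['2'] then
    2 * 3 ^ (cs.length - 1) + ternaryToNumA cs.tail
  else if PySem.Chars.pyGet? cs 0 = some '1' ∧ cs ≠ ['1'] then
    3 ^ (cs.length - 1) + ternaryToNumA cs.tail
  else ternaryToNumA cs.tail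
  termination_by cs.length
  decreasing_by all_goals simp_all [List.length_pos_iff]

def ternaryToNum (s : String) : Int := ternaryToNumA s.toList

-- ===== PORT B =====
def ternaryToNum_alt (s : String) : Int :=
  s.toList.foldl (fun r c => r * 3 + (if c = '1' then 1 else if c = '2' then 2 else 0)) 0

-- ===== PRECONDITION & SPEC =====
def Spec_ternaryToNum (s : String) (out : Int) : Prop := out = ternaryToNum_alt s
instance (s : String) (out : Int) : Decidable (Spec_ternaryToNum s out) := by unfold Spec_ternaryToNum; infer_instance

-- ===== CLAIM (what is proved, stated in full; the proofs are below) =====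
def Claim_equal_ternaryToNum : Prop := ∀ (s : String), Dom_ternaryToNum s → Spec_ternaryToNum s (ternaryToNum s)

-- ===== LEMMAS AND PROOFS =====
-- digit value B assigns to a character
def pvDigit (c : Char) : Int := if c = '1' then 1 else if c = '2' then 2 else 0

theorem pvGet0 (c : Char) (t : List Char) : PySem.Chars.pyGet? (c :: t) 0 = some c := by
  simp [PySem.Chars.pyGet?, PySem.List.pyGet?, PySem.List.pyIdx?]

theorem pvHorner_shift (cs : List Char) (a : Int) :
    cs.foldl (fun r c => r * 3 + pvDigit c) a
      = a * 3 ^ cs.length + cs.foldl (fun r c => r * 3 + pvDigit c) 0 := by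
  induction cs generalizing a with
  | nil => simp
  | cons c t ih =>
    simp only [List.foldl_cons, List.length_cons]
    rw [ih (a * 3 + pvDigit c), ih (0 * 3 + pvDigit c)]
    ring

theorem pvA_eq_horner (cs : List Char) :
    ternaryToNumA cs = cs.foldl (fun r c => r * 3 + pvDigit c) 0 := by
  induction cs with
  | nil => simp [ternaryToNumA]
  | cons c t ih =>
    rw [ternaryToNumA]
    simp only [List.foldl_cons, List.tail_cons]
    rw [pvHorner_shift t (0 * 3 + pvDigit c), ← ih]
    cases t with
    | nil =>
      by_cases h0 : c = '0' <;> by_cases h1 : c = '1' <;> by_cases h2 : c = '2' <;>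
        simp_all [ternaryToNumA, pvDigit]
    | cons d u =>
      have hne : c :: d :: u ≠ [] := by simp
      have h0 : c :: d :: u ≠ ['0'] := by simp
      have h1 : c :: d :: u ≠ ['1'] := by simp
      have h2 : c :: d :: u ≠ ['2'] := by simp
      simp only [if_neg hne, if_neg h0, if_neg h1, if_neg h2, pvGet0, List.length_cons,
        Nat.add_sub_cancel, Option.some.injEq]
      by_cases hc2 : c = '2' <;> by_cases hc1 : c = '1' <;>
        simp_all [pvDigit]

-- ===== VERDICT (by name: the statement is the Claim_ definition above) =====
theorem ternaryToNum_spec : Claim_equal_ternaryToNum := by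
  intro s _
  unfold Spec_ternaryToNum ternaryToNum ternaryToNum_alt
  simpa [pvDigit] using pvA_eq_horner s.toList
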